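-- pv_equiv track=rewrite | github.com/EdwardChhun/CISP430 | week3/wk3_submission.py | foo
-- ===== SOURCE A (Python) =====
-- def foo(chunk) -> int:
--     chunk = chunk[::-1]
--     total_missing_score = 0
--
--     for i in chunk:
--         total_missing_score *= 2
--         if i == "(": total_missing_score +=  1
--         if i == "[": total_missing_score +=  2
--         if i == "{": total_missing_score +=  3
--         if i == "<": total_missing_score +=  4
--
--     return total_missing_score
-- ===== SOURCE B (Python) =====
-- def foo(chunk) -> int:
--     weight = {'(': 1, '[': 2, '{': 3, '<': 4}
--     total = 0
--     for i, c in enumerate(chunk):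
--         total += weight.get(c, 0) * (1 << i)
--     return total
-- ===== Notes on version B (the rewrite author's own statement) =====
-- stated objective: alternative
-- what changed: Replaces A's reverse-the-string-then-Horner doubling accumulator with a single forward pass over the original string that adds weight(c) * 2**i from an explicit weight map via enumerate.
import Mathlib
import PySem

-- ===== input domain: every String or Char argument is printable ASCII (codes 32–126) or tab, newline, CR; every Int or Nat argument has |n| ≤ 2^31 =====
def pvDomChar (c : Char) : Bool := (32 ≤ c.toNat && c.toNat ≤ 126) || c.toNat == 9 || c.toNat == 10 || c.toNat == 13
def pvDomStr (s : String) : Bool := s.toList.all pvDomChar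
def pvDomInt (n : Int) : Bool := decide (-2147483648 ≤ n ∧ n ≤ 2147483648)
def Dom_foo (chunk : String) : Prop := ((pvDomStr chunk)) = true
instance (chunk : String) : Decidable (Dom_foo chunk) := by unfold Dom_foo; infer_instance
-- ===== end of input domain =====

-- B iterates forward over the original string adding weight(c) * 2^i (weight map + enumerate)
-- instead of A's reverse-then-doubling accumulator; same cost, different decomposition.

-- ===== PORT A =====
-- one loop step of A: double, then the four sequential ifs
def fooStep (t : Int) (c : Char) : Int :=
  let t := t * 2
  let t := if c = '(' then t + 1 else t
  let t := if c = '[' then t + 2 else t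
  let t := if c = '{' then t + 3 else t
  let t := if c = '<' then t + 4 else t
  t

def foo (chunk : String) : Int :=
  -- chunk = chunk[::-1]  (slice? with step -1 is always `some`); then the for-loop
  ((PySem.List.slice? chunk.toList none none (-1)).getD []).foldl fooStep 0

-- ===== PORT B =====
def fooWeight : PySem.Dict Char Int :=
  PySem.Dict.ofList [('(', 1), ('[', 2), ('{', 3), ('<', 4)]

def foo_alt (chunk : String) : Int :=
  (PySem.List.enumerate chunk.toList 0).foldl
    (fun total p => total + (fooWeight.getD p.2 0) * 2 ^ p.1.toNat) 0

-- ===== PRECONDITION & SPEC =====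
def Spec_foo (chunk : String) (out : Int) : Prop := out = foo_alt chunk
instance (chunk : String) (out : Int) : Decidable (Spec_foo chunk out) := by unfold Spec_foo; infer_instance

-- ===== CLAIM (what is proved, stated in full; the proofs are below) =====
def Claim_equal_foo : Prop := ∀ (chunk : String), Dom_foo chunk → Spec_foo chunk (foo chunk)

-- ===== LEMMAS AND PROOFS =====

-- common reference value: Σ weight(l[j]) * 2^j, as a little recursion
def fooG : List Char → Int
  | [] => 0
  | c :: cs => (fooWeight.getD c 0) + 2 * fooG cs

theorem fooStep_eq (t : Int) (c : Char) :
    fooStep t c = 2 * t + fooWeight.getD c 0 := by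
  have hW : fooWeight = PySem.Dict.mk [('(', 1), ('[', 2), ('{', 3), ('<', 4)] := by decide
  have hget : (((PySem.Dict.mk [('(', 1), ('[', 2), ('{', 3), ('<', 4)] :
        PySem.Dict Char Int)).get? c).getD 0
      = (if c = '(' then 1 else if c = '[' then 2 else if c = '{' then 3
         else if c = '<' then 4 else (0 : Int)) := by
    simp only [PySem.Dict.get?_mk_cons]
    split_ifs <;> simp_all [beq_iff_eq, PySem.Dict.get?] <;> simp_all [@eq_comm Char]
  have hgetD : fooWeight.getD c 0
      = (if c = '(' then 1 else if c = '[' then 2 else if c = '{' then 3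
         else if c = '<' then 4 else (0 : Int)) := by
    rw [hW]; rw [← hget]; simp [PySem.Dict.getD]
  rw [hgetD]
  simp only [fooStep]
  split_ifs <;> simp_all <;> try ring

theorem fooG_append_singleton (xs : List Char) (c : Char) :
    fooG (xs ++ [c]) = fooG xs + 2 ^ xs.length * fooWeight.getD c 0 := by
  induction xs with
  | nil => simp [fooG]
  | cons x xs ih => simp [fooG, ih, pow_succ]; ring

theorem fooA_fold (m : List Char) (acc : Int) :
    m.foldl fooStep acc = acc * 2 ^ m.length + fooG m.reverse := by
  induction m generalizing acc with
  | nil => simp [fooG]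
  | cons c cs ih =>
      simp only [List.foldl_cons, ih, fooStep_eq, List.reverse_cons, List.length_cons]
      rw [fooG_append_singleton]
      simp [pow_succ]
      ring

theorem fooB_fold (l : List Char) (acc : Int) (s : Nat) :
    (PySem.List.enumerate l (s : Int)).foldl
      (fun total p => total + (fooWeight.getD p.2 0) * 2 ^ p.1.toNat) acc
      = acc + 2 ^ s * fooG l := by
  induction l generalizing acc s with
  | nil => simp [PySem.List.enumerate_nil, fooG]
  | cons c cs ih =>
      rw [PySem.List.enumerate_cons, List.foldl_cons]
      have : ((s : Int) + 1) = ((s + 1 : Nat) : Int) := by push_cast; ring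
      rw [this, ih]
      simp [fooG, Int.toNat_natCast, pow_succ]
      ring

theorem fooB_fold_zero (l : List Char) (acc : Int) :
    (PySem.List.enumerate l 0).foldl
      (fun total p => total + (fooWeight.getD p.2 0) * 2 ^ p.1.toNat) acc
      = acc + fooG l := by
  simpa using fooB_fold l acc 0

-- ===== VERDICT (by name: the statement is the Claim_ definition above) =====
theorem foo_spec : Claim_equal_foo := by
  intro chunk _
  unfold Spec_foo foo foo_alt
  rw [PySem.List.slice?_none_none_neg_one]
  simp only [Option.getD_some]
  rw [fooA_fold, fooB_fold_zero]
  simp
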